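-- pv_equiv track=rewrite | github.com/kareemadesola/pythonDataStructures | LeetCode/daily/january_24.py | findMatrixAlt
-- ===== SOURCE A (Python) =====
-- from collections import defaultdict, Counter
-- from typing import List, Optional
--
-- def findMatrixAlt(nums: List[int]) -> List[List[int]]:
--     cnt = defaultdict(int)
--     res = []
--     for n in nums:
--         row = cnt[n]
--         if len(res) == row:
--             res.append([])
--         res[row].append(n)
--         cnt[n] += 1
--     return res
-- ===== SOURCE B (Python) =====
-- from typing import List
--
-- def findMatrixAlt(nums: List[int]) -> List[List[int]]:
--     res = []
--     remaining = nums
--     while remaining: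
--         seen = set()
--         row = []
--         rest = []
--         for n in remaining:
--             if n in seen:
--                 rest.append(n)
--             else:
--                 seen.add(n)
--                 row.append(n)
--         res.append(row)
--         remaining = rest
--     return res
-- ===== Notes on version B (the rewrite author's own statement) =====
-- stated objective: alternative
-- what changed: B repeatedly peels one copy of each distinct value per round (stable partition of the remaining list into first occurrences and the rest, looped until empty), instead of A's single pass that routes each element by a per-value running occurrence counter.
import Mathlib
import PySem

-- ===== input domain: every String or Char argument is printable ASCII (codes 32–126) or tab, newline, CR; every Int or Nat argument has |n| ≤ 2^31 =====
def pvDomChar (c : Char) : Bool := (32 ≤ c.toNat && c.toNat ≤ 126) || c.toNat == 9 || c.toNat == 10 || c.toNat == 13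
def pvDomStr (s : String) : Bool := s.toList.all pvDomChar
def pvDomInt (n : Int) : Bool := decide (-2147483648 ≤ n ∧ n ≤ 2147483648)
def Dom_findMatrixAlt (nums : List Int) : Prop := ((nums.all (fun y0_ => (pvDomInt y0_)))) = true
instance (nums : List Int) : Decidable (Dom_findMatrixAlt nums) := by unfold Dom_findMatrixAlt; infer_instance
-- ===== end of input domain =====

-- B repeatedly peels one copy of each distinct value per round (stable partition into first
-- occurrences and the rest, looped until empty) instead of A's one pass with a per-value
-- running occurrence counter; objective: alternative.

-- ===== PORT A =====
-- one loop iteration of A: row = cnt[n]; lazily append a new row; res[row].append(n); cnt[n] += 1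
def pvStepA (st : PySem.Dict Int Int × List (List Int)) (n : Int) :
    PySem.Dict Int Int × List (List Int) :=
  let row := st.1.getD n 0
  let res := if (st.2.length : Int) = row then st.2 ++ [[]] else st.2
  (st.1.insert n (row + 1), res.set row.toNat (res.getD row.toNat [] ++ [n]))

def findMatrixAlt (nums : List Int) : List (List Int) :=
  (nums.foldl pvStepA (PySem.Dict.empty, [])).2

-- ===== PORT B =====
-- inner for-loop body of B: if n in seen: rest.append(n) else: seen.add(n); row.append(n)
def pvPeelStep (st : PySem.Set Int × List Int × List Int) (n : Int) :
    PySem.Set Int × List Int × List Int :=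
  if PySem.Set.contains st.1 n then (st.1, st.2.1, st.2.2 ++ [n])
  else (PySem.Set.add st.1 n, st.2.1 ++ [n], st.2.2)

-- one round of the while-loop: partition `remaining` into (seen, row, rest)
def pvPeel (l : List Int) : PySem.Set Int × List Int × List Int :=
  l.foldl pvPeelStep (PySem.Set.empty, [], [])

-- termination measure: each round strictly shrinks the remaining list
lemma pvPeel_len : ∀ (l : List Int) (S : PySem.Set Int) (row rest : List Int),
    (l.foldl pvPeelStep (S, row, rest)).2.1.length + (l.foldl pvPeelStep (S, row, rest)).2.2.length
      = row.length + rest.length + l.length := by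
  intro l
  induction l with
  | nil => intro S row rest; simp
  | cons n t ih =>
    intro S row rest
    rw [List.foldl_cons]
    by_cases hc : PySem.Set.contains S n = true
    · rw [show pvPeelStep (S, row, rest) n = (S, row, rest ++ [n]) from by
        unfold pvPeelStep; rw [if_pos hc]]
      rw [ih]
      simp
      omega
    · rw [show pvPeelStep (S, row, rest) n = (PySem.Set.add S n, row ++ [n], rest) from by
        unfold pvPeelStep; rw [if_neg hc]]
      rw [ih]
      simp
      omega

-- the row component only grows
lemma pvPeel_row_ge : ∀ (l : List Int) (S : PySem.Set Int) (row rest : List Int),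
    row.length ≤ (l.foldl pvPeelStep (S, row, rest)).2.1.length := by
  intro l
  induction l with
  | nil => intro S row rest; simp
  | cons n t ih =>
    intro S row rest
    rw [List.foldl_cons]
    by_cases hc : PySem.Set.contains S n = true
    · rw [show pvPeelStep (S, row, rest) n = (S, row, rest ++ [n]) from by
        unfold pvPeelStep; rw [if_pos hc]]
      exact ih S row (rest ++ [n])
    · rw [show pvPeelStep (S, row, rest) n = (PySem.Set.add S n, row ++ [n], rest) from by
        unfold pvPeelStep; rw [if_neg hc]]
      have := ih (PySem.Set.add S n) (row ++ [n]) rest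
      simp at this
      omega

lemma pvPeel_rest_lt (n : Int) (t : List Int) :
    (pvPeel (n :: t)).2.2.length < (n :: t).length := by
  have hst : pvPeelStep (PySem.Set.empty, [], []) n
      = (PySem.Set.add PySem.Set.empty n, [n], []) := by
    unfold pvPeelStep PySem.Set.contains PySem.Set.empty
    simp
  have h := pvPeel_len t (PySem.Set.add PySem.Set.empty n) [n] []
  have hrow := pvPeel_row_ge t (PySem.Set.add PySem.Set.empty n) [n] []
  unfold pvPeel
  rw [List.foldl_cons, hst]
  simp only [List.length_cons, List.length_nil] at h hrow ⊢
  omega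

-- B: while remaining: (seen,row,rest) := peel remaining; res.append(row); remaining := rest
def findMatrixAlt_alt : List Int → List (List Int)
  | [] => []
  | n :: t =>
    (pvPeel (n :: t)).2.1 :: findMatrixAlt_alt (pvPeel (n :: t)).2.2
  termination_by l => l.length
  decreasing_by exact pvPeel_rest_lt n t

-- ===== PRECONDITION & SPEC =====
def Spec_findMatrixAlt (nums : List Int) (out : List (List Int)) : Prop := out = findMatrixAlt_alt nums
instance (nums : List Int) (out : List (List Int)) : Decidable (Spec_findMatrixAlt nums out) := by unfold Spec_findMatrixAlt; infer_instance

-- ===== CLAIM (what is proved, stated in full; the proofs are below) =====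
def Claim_equal_findMatrixAlt : Prop := ∀ (nums : List Int), Dom_findMatrixAlt nums → Spec_findMatrixAlt nums (findMatrixAlt nums)

-- ===== LEMMAS AND PROOFS =====

-- membership in an added set
lemma pv_contains_add (S : PySem.Set Int) (n m : Int) (hm : m ≠ n) :
    PySem.Set.contains (PySem.Set.add S n) m = PySem.Set.contains S m := by
  cases h : PySem.Set.contains S m with
  | true =>
    rw [PySem.Set.contains_iff] at h ⊢
    exact (PySem.Set.mem_add _ _ _).mpr (Or.inl h)
  | false =>
    rw [Bool.eq_false_iff]
    intro hc
    rw [PySem.Set.contains_iff] at hc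
    rcases (PySem.Set.mem_add _ _ _).mp hc with h' | h'
    · rw [Bool.eq_false_iff] at h
      exact h ((PySem.Set.contains_iff _ _).mpr h')
    · exact hm h'

-- A's counter counts occurrences of the processed prefix
lemma pvA_count_gen : ∀ (p : List Int) (c : PySem.Dict Int Int) (res : List (List Int)) (m : Int),
    (p.foldl pvStepA (c, res)).1.getD m 0 = c.getD m 0 + (p.count m : Int) := by
  intro p
  induction p with
  | nil => intro c res m; simp
  | cons n t ih =>
    intro c res m
    rw [List.foldl_cons]
    have hstep1 : (pvStepA (c, res) n).1 = c.insert n (c.getD n 0 + 1) := rfl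
    have h2 := ih (pvStepA (c, res) n).1 (pvStepA (c, res) n).2 m
    have hfold : (t.foldl pvStepA (pvStepA (c, res) n)).1
        = (t.foldl pvStepA ((pvStepA (c, res) n).1, (pvStepA (c, res) n).2)).1 := rfl
    rw [hfold, h2, hstep1, PySem.Dict.getD_insert, List.count_cons]
    by_cases hm : m = n
    · subst hm
      rw [if_pos rfl]
      simp only [beq_self_eq_true, if_true]
      push_cast
      omega
    · have hne : (m == n) = false := beq_eq_false_iff_ne.mpr hm
      have hne' : (n == m) = false := beq_eq_false_iff_ne.mpr (Ne.symm hm)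
      rw [if_neg hm]
      simp [hne']

lemma pvA_count (p : List Int) (m : Int) :
    (p.foldl pvStepA (PySem.Dict.empty, [])).1.getD m 0 = (p.count m : Int) := by
  rw [pvA_count_gen]
  simp

-- pvPeel's seen set holds exactly the members of the list
lemma pvPeel_seen_gen : ∀ (p : List Int) (st : PySem.Set Int × List Int × List Int) (m : Int),
    (PySem.Set.contains (p.foldl pvPeelStep st).1 m = true)
      ↔ (PySem.Set.contains st.1 m = true ∨ m ∈ p) := by
  intro p
  induction p with
  | nil => intro st m; simp
  | cons n t ih =>
    intro st m
    rw [List.foldl_cons, ih]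
    unfold pvPeelStep
    split_ifs with hc
    · constructor
      · rintro (h | h)
        · exact Or.inl h
        · exact Or.inr (List.mem_cons_of_mem _ h)
      · rintro (h | h)
        · exact Or.inl h
        · rcases List.mem_cons.mp h with h | h
          · subst h; exact Or.inl hc
          · exact Or.inr h
    · simp only [PySem.Set.contains_iff, List.mem_cons]
      rw [show ∀ y, (y ∈ PySem.Set.add st.1 n) ↔ (y ∈ st.1 ∨ y = n) from
        fun y => PySem.Set.mem_add _ _ _]
      tauto

lemma pvPeel_seen (p : List Int) (m : Int) :
    PySem.Set.contains (pvPeel p).1 m = true ↔ m ∈ p := by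
  unfold pvPeel
  rw [pvPeel_seen_gen]
  simp [PySem.Set.empty, PySem.Set.contains]

-- snoc behaviour of pvPeel
lemma pvPeel_snoc (p : List Int) (x : Int) :
    pvPeel (p ++ [x]) = pvPeelStep (pvPeel p) x := by
  unfold pvPeel; rw [List.foldl_append]; rfl

-- rest's count is the list's count minus one for fresh members
lemma pvPeel_rest_count_gen : ∀ (p : List Int) (S : PySem.Set Int) (row rest : List Int) (m : Int),
    ((p.foldl pvPeelStep (S, row, rest)).2.2.count m : Int)
      = (rest.count m : Int) + (p.count m : Int)
        - (if m ∈ p ∧ PySem.Set.contains S m = false then 1 else 0) := by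
  intro p
  induction p with
  | nil => intro S row rest m; simp
  | cons n t ih =>
    intro S row rest m
    rw [List.foldl_cons]
    by_cases hc : PySem.Set.contains S n = true
    · have hstep : pvPeelStep (S, row, rest) n = (S, row, rest ++ [n]) := by
        unfold pvPeelStep; rw [if_pos hc]
      rw [hstep, ih]
      by_cases hm : m = n
      · subst hm
        simp only [List.count_append, List.count_cons, List.mem_cons, hc]
        simp
        omega
      · simp only [List.count_append, List.count_cons, List.mem_cons]
        simp [hm]
        omega
    · have hstep : pvPeelStep (S, row, rest) n = (PySem.Set.add S n, row ++ [n], rest) := by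
        unfold pvPeelStep; rw [if_neg hc]
      rw [hstep, ih]
      by_cases hm : m = n
      · subst hm
        have hcadd : PySem.Set.contains (PySem.Set.add S m) m = true := by
          rw [PySem.Set.contains_iff]
          exact (PySem.Set.mem_add _ _ _).mpr (Or.inr rfl)
        have hcf : PySem.Set.contains S m = false := Bool.eq_false_iff.mpr hc
        rw [if_neg (by simp), if_pos (show m ∈ m :: t ∧ PySem.Set.contains S m = false from ⟨by simp, hcf⟩)]
        have hcc : (m :: t).count m = t.count m + 1 := by simp
        rw [hcc]
        push_cast
        omega
      · rw [pv_contains_add S n m hm]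
        simp only [List.count_cons, List.mem_cons]
        simp [hm, Ne.symm hm]

lemma pvPeel_rest_count (p : List Int) (m : Int) (hm : m ∈ p) :
    ((pvPeel p).2.2.count m : Int) = (p.count m : Int) - 1 := by
  unfold pvPeel
  rw [pvPeel_rest_count_gen]
  have h0 : PySem.Set.contains (PySem.Set.empty : PySem.Set Int) m = false := by
    simp [PySem.Set.empty, PySem.Set.contains]
  simp [hm]

-- main invariant: each pass of A's fold produces the peel row and recurses on the rest
lemma pvA_peel : ∀ (p : List Int), p ≠ [] →
    (p.foldl pvStepA (PySem.Dict.empty, [])).2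
      = (pvPeel p).2.1 :: (((pvPeel p).2.2).foldl pvStepA (PySem.Dict.empty, [])).2 := by
  intro p
  induction p using List.reverseRecOn with
  | nil => intro h; exact absurd rfl h
  | append_singleton p x ih =>
    intro _
    rw [pvPeel_snoc]
    by_cases hx : x ∈ p
    · -- x seen before: A appends into a deeper row; B routes x to rest
      have hp : p ≠ [] := by rintro rfl; simp at hx
      have hres := ih hp
      have hrowA := pvA_count p x
      have hrowR : ((pvPeel p).2.2.foldl pvStepA (PySem.Dict.empty, [])).1.getD x 0
          = (p.count x : Int) - 1 := by
        rw [pvA_count, pvPeel_rest_count p x hx]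
      have hcnt1 : 1 ≤ p.count x := List.count_pos_iff.mpr hx
      have hseen : PySem.Set.contains (pvPeel p).1 x = true := (pvPeel_seen p x).mpr hx
      have hstepPeel : pvPeelStep (pvPeel p) x
          = ((pvPeel p).1, (pvPeel p).2.1, (pvPeel p).2.2 ++ [x]) := by
        unfold pvPeelStep; rw [if_pos hseen]
      rw [List.foldl_append, hstepPeel]
      show (pvStepA (p.foldl pvStepA (PySem.Dict.empty, [])) x).2
          = (pvPeel p).2.1 :: (((pvPeel p).2.2 ++ [x]).foldl pvStepA (PySem.Dict.empty, [])).2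
      rw [List.foldl_append]
      generalize hsA : p.foldl pvStepA (PySem.Dict.empty, []) = sA at hres hrowA
      generalize hsR : (pvPeel p).2.2.foldl pvStepA (PySem.Dict.empty, []) = sR at hres hrowR
      obtain ⟨cA, rA⟩ := sA
      obtain ⟨cR, rR⟩ := sR
      simp only at hres hrowA hrowR
      subst hres
      show ((if ((((pvPeel p).2.1 :: rR).length : Int) = cA.getD x 0)
              then ((pvPeel p).2.1 :: rR) ++ [[]] else (pvPeel p).2.1 :: rR).set (cA.getD x 0).toNat
            ((if ((((pvPeel p).2.1 :: rR).length : Int) = cA.getD x 0)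
              then ((pvPeel p).2.1 :: rR) ++ [[]] else (pvPeel p).2.1 :: rR).getD (cA.getD x 0).toNat [] ++ [x]))
          = (pvPeel p).2.1 ::
            ((if ((rR.length : Int) = cR.getD x 0) then rR ++ [[]] else rR).set (cR.getD x 0).toNat
              ((if ((rR.length : Int) = cR.getD x 0) then rR ++ [[]] else rR).getD (cR.getD x 0).toNat [] ++ [x]))
      rw [hrowA, hrowR]
      have hk1 : (1 : Int) ≤ (p.count x : Int) := by exact_mod_cast hcnt1
      have hkN : ((p.count x : Int)).toNat = ((p.count x : Int) - 1).toNat + 1 := by omega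
      by_cases hcase : ((rR.length : Int)) = (p.count x : Int) - 1
      · rw [if_pos (by simp; omega), if_pos hcase,
          show ((pvPeel p).2.1 :: rR) ++ [[]] = (pvPeel p).2.1 :: (rR ++ [[]]) from by simp, hkN]
        rw [List.set_cons_succ, List.getD_cons_succ]
      · rw [if_neg (by simp; omega), if_neg hcase, hkN]
        rw [List.set_cons_succ, List.getD_cons_succ]
    · -- x is new: A appends x to row 0; B puts it in the current row
      have hrowA : (p.foldl pvStepA (PySem.Dict.empty, [])).1.getD x 0 = 0 := by
        rw [pvA_count]
        simp [List.count_eq_zero_of_not_mem hx]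
      have hseen : PySem.Set.contains (pvPeel p).1 x = false := by
        rw [Bool.eq_false_iff]
        intro h
        exact hx ((pvPeel_seen p x).mp h)
      have hstepPeel : pvPeelStep (pvPeel p) x
          = (PySem.Set.add (pvPeel p).1 x, (pvPeel p).2.1 ++ [x], (pvPeel p).2.2) := by
        unfold pvPeelStep
        rw [hseen]
        simp
      rw [List.foldl_append, hstepPeel]
      rcases List.eq_nil_or_concat p with rfl | hne
      · -- p = []
        show (pvStepA (PySem.Dict.empty, []) x).2 = _
        unfold pvStepA
        simp [pvPeel, PySem.Set.empty, List.getD]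
      · have hp : p ≠ [] := by rcases hne with ⟨a, b, rfl⟩; simp
        have hres := ih hp
        show (pvStepA (p.foldl pvStepA (PySem.Dict.empty, [])) x).2
            = ((pvPeel p).2.1 ++ [x]) :: ((pvPeel p).2.2.foldl pvStepA (PySem.Dict.empty, [])).2
        generalize hsA : p.foldl pvStepA (PySem.Dict.empty, []) = sA at hres hrowA
        generalize hsR : (pvPeel p).2.2.foldl pvStepA (PySem.Dict.empty, []) = sR at hres
        obtain ⟨cA, rA⟩ := sA
        obtain ⟨cR, rR⟩ := sR
        simp only at hres hrowA
        subst hres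
        show ((if ((((pvPeel p).2.1 :: rR).length : Int) = cA.getD x 0)
                then ((pvPeel p).2.1 :: rR) ++ [[]] else (pvPeel p).2.1 :: rR).set (cA.getD x 0).toNat
              ((if ((((pvPeel p).2.1 :: rR).length : Int) = cA.getD x 0)
                then ((pvPeel p).2.1 :: rR) ++ [[]] else (pvPeel p).2.1 :: rR).getD (cA.getD x 0).toNat [] ++ [x]))
            = ((pvPeel p).2.1 ++ [x]) :: rR
        rw [hrowA]
        rw [if_neg (by simp; omega)]
        rw [show ((0 : Int)).toNat = 0 from rfl, List.set_cons_zero, List.getD_cons_zero]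

-- ===== VERDICT (by name: the statement is the Claim_ definition above) =====
lemma pv_final : ∀ (k : Nat) (nums : List Int), nums.length ≤ k →
    findMatrixAlt nums = findMatrixAlt_alt nums := by
  intro k
  induction k with
  | zero =>
    intro nums h
    have hnil : nums = [] := List.eq_nil_of_length_eq_zero (Nat.le_zero.mp h)
    subst hnil
    simp [findMatrixAlt, findMatrixAlt_alt]
  | succ k ih =>
    intro nums h
    match nums with
    | [] => simp [findMatrixAlt, findMatrixAlt_alt]
    | n :: t =>
      have hA := pvA_peel (n :: t) (by simp)
      have hlt := pvPeel_rest_lt n t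
      have hrec : findMatrixAlt ((pvPeel (n :: t)).2.2) = findMatrixAlt_alt ((pvPeel (n :: t)).2.2) := by
        apply ih
        simp only [List.length_cons] at h hlt ⊢
        omega
      show (List.foldl pvStepA (PySem.Dict.empty, []) (n :: t)).2 = _
      rw [hA, findMatrixAlt_alt]
      exact congrArg _ hrec

theorem findMatrixAlt_spec : Claim_equal_findMatrixAlt := by
  intro nums _
  unfold Spec_findMatrixAlt
  exact pv_final nums.length nums le_rfl
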